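-- pv_equiv track=rewrite | github.com/LarsVoelker/FibexConverter | abstract_parser.py | value_to_bit
-- ===== SOURCE A (Python) =====
-- from typing import Any, Dict, Hashable, Iterable, Optional, Tuple
--
-- def value_to_bit(i: int) -> Optional[int]:
--     """
--     Return the bit index of a power-of-two integer or ``None`` otherwise.
--
--     ``i`` must be a strictly positive power of two (e.g. 1, 2, 4, 8, ...).
--     """
--     if i <= 0 or i.bit_count() != 1:
--         return None
--
--     bitnumber = 0
--     tmp = i
--     while tmp & 1 != 1:
--         tmp >>= 1
--         bitnumber += 1
--
--     return bitnumber
-- ===== SOURCE B (Python) =====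
-- def value_to_bit(i: int):
--     """Return the bit index of a strictly positive power-of-two integer, else None."""
--     if i <= 0 or i.bit_count() != 1:
--         return None
--     return i.bit_length() - 1
-- ===== Notes on version B (the rewrite author's own statement) =====
-- stated objective: idiomatic
-- what changed: B keeps A's power-of-two guard but replaces the trailing-zero counting while-loop with the closed-form i.bit_length() - 1, doing no iteration at all.
import Mathlib
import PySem

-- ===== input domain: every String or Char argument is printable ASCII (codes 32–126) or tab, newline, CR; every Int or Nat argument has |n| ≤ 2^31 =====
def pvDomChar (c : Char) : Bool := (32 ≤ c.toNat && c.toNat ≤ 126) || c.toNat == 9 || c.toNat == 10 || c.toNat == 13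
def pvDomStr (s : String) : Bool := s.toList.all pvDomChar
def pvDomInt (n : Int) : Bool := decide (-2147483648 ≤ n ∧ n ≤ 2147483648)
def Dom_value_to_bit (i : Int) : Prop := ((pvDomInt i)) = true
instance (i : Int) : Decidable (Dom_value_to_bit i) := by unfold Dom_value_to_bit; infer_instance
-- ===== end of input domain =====

-- B replaces A's trailing-zero counting loop with the closed form bit_length(i) - 1 (idiomatic, no iteration).


-- ===== PORT A =====
-- the 'while tmp & 1 != 1' loop; the 'tmp = 0' test only makes the recursion total
-- (A's guard ensures tmp is a positive power of two, so the loop hits an odd tmp)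
def pvLoopA (tmp : Nat) (bit : Int) : Int :=
  if tmp % 2 ≠ 1 then
    if tmp = 0 then bit else pvLoopA (tmp / 2) (bit + 1)
  else bit
termination_by tmp
decreasing_by omega

def value_to_bit (i : Int) : Option Int :=
  if i ≤ 0 ∨ PySem.Int.bitCount i ≠ 1 then none
  else some (pvLoopA i.toNat 0)

-- ===== PORT B =====
def value_to_bit_alt (i : Int) : Option Int :=
  if i ≤ 0 ∨ PySem.Int.bitCount i ≠ 1 then none
  else some ((PySem.Int.bitLength i : Int) - 1)

-- ===== PRECONDITION & SPEC =====
def Spec_value_to_bit (i : Int) (out : Option Int) : Prop := out = value_to_bit_alt i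
instance (i : Int) (out : Option Int) : Decidable (Spec_value_to_bit i out) := by unfold Spec_value_to_bit; infer_instance

-- ===== CLAIM (what is proved, stated in full; the proofs are below) =====
def Claim_equal_value_to_bit : Prop := ∀ (i : Int), Dom_value_to_bit i → Spec_value_to_bit i (value_to_bit i)

-- ===== LEMMAS AND PROOFS =====
theorem pvBitCount_eq_zero (n : Nat) (h : PySem.Int.bitCount (n : Int) = 0) : n = 0 := by
  induction n using Nat.strong_induction_on with
  | _ n ih =>
    rcases Nat.eq_zero_or_pos n with h0 | hp
    · exact h0
    · rw [PySem.Int.bitCount_natCast hp] at h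
      have h2 : n / 2 = 0 := ih (n / 2) (by omega) (by omega)
      omega

theorem pvLoopA_closed (n : Nat) : ∀ (b : Int), 0 < n →
    PySem.Int.bitCount (n : Int) = 1 →
    pvLoopA n b = b + (PySem.Int.bitLength (n : Int) : Int) - 1 := by
  induction n using Nat.strong_induction_on with
  | _ n ih =>
    intro b hp hc
    rw [PySem.Int.bitCount_natCast hp] at hc
    by_cases hodd : n % 2 = 1
    · rw [pvLoopA, if_neg (not_not_intro hodd)]
      have h2 : PySem.Int.bitCount ((n / 2 : Nat) : Int) = 0 := by omega
      have hn1 : n = 1 := by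
        have := pvBitCount_eq_zero _ h2
        omega
      subst hn1
      norm_num [show PySem.Int.bitLength (1 : Int) = 1 from by decide]
    · have hne : n ≠ 0 := by omega
      rw [pvLoopA, if_pos hodd, if_neg hne]
      rw [ih (n / 2) (by omega) (b + 1) (by omega) (by omega),
          PySem.Int.bitLength_natCast hp]
      push_cast
      ring

theorem value_to_bit_spec : Claim_equal_value_to_bit := by
  intro i _
  unfold Spec_value_to_bit value_to_bit value_to_bit_alt
  by_cases h : i ≤ 0 ∨ PySem.Int.bitCount i ≠ 1
  · simp [h]
  · rw [if_neg h, if_neg h]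
    have hpos : ¬ i ≤ 0 := fun hle => h (Or.inl hle)
    have hc : PySem.Int.bitCount i = 1 := by
      by_contra hne; exact h (Or.inr hne)
    have hcast : ((i.toNat : Nat) : Int) = i := Int.toNat_of_nonneg (by omega)
    have := pvLoopA_closed i.toNat 0 (by omega) (by rw [hcast]; exact hc)
    rw [this, hcast]
    ring_nf
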